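-- pv_equiv track=rewrite | github.com/mzaks/mojo-unicode | gen_to_upper_tree.py | find_contiguous_sub_ranges
-- ===== SOURCE A (Python) =====
-- def find_contiguous_sub_ranges(vals: list[int], step: int = 1) -> list[tuple[int, int]]:
--     """Split sorted values into contiguous sub-ranges with given step."""
--     if not vals:
--         return []
--     ranges = []
--     start = vals[0]
--     prev = vals[0]
--     for v in vals[1:]:
--         if v == prev + step:
--             prev = v
--         else:
--             ranges.append((start, prev))
--             start = v
--             prev = v
--     ranges.append((start, prev))
--     return ranges
-- ===== SOURCE B (Python) =====
-- def find_contiguous_sub_ranges(vals: list[int], step: int = 1) -> list[tuple[int, int]]: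
--     """Split sorted values into contiguous sub-ranges with given step.
--
--     Two-pass boundary-table formulation: collect the consecutive pairs that
--     break contiguity, then zip segment starts with segment ends.
--     """
--     if not vals:
--         return []
--     pairs = list(zip(vals, vals[1:]))
--     brks = [(a, b) for a, b in pairs if b != a + step]
--     starts = [vals[0]] + [b for _, b in brks]
--     ends = [a for a, _ in brks] + [vals[-1]]
--     return list(zip(starts, ends))
-- ===== Notes on version B (the rewrite author's own statement) =====
-- stated objective: alternative
-- what changed: Replaces A's running start/prev accumulator loop with a two-pass boundary table: filter the consecutive value pairs that break contiguity, then zip the segment starts with the segment ends.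
import Mathlib
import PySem

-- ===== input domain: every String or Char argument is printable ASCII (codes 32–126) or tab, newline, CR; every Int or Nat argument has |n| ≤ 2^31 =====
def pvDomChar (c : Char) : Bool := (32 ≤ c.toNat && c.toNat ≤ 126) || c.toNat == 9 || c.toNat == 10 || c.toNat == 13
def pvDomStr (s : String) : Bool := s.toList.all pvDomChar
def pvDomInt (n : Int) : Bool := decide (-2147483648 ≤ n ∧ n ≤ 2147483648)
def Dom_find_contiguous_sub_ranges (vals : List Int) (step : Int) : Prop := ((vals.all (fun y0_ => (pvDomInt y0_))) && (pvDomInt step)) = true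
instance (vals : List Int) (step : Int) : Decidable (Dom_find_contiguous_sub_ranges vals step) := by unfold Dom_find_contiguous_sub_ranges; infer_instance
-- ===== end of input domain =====

-- B replaces A's running start/prev accumulator loop with a two-pass boundary table
-- (filter the contiguity-breaking consecutive pairs, then zip segment starts with ends);
-- same O(n) cost, different decomposition.

-- ===== PORT A =====
-- A's for-loop over vals[1:] with state (ranges, start, prev); the final
-- `ranges.append((start, prev))` is the base case.
def pvLoopA (step : Int) : List Int → List (Int × Int) → Int → Int → List (Int × Int)
  | [], ranges, start, prev => ranges ++ [(start, prev)]
  | v :: rest, ranges, start, prev =>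
    if v = prev + step then pvLoopA step rest ranges start v
    else pvLoopA step rest (ranges ++ [(start, prev)]) v v

def find_contiguous_sub_ranges (vals : List Int) (step : Int) : List (Int × Int) :=
  match vals with
  | [] => []
  | v0 :: rest => pvLoopA step rest [] v0 v0

-- ===== PORT B =====
def find_contiguous_sub_ranges_alt (vals : List Int) (step : Int) : List (Int × Int) :=
  match vals with
  | [] => []
  | v0 :: rest =>
    let pairs := (v0 :: rest).zip rest                                   -- zip(vals, vals[1:])
    let brks := pairs.filter (fun p => decide (p.2 ≠ p.1 + step))        -- contiguity breaks
    let starts := v0 :: brks.map Prod.snd                                -- [vals[0]] + …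
    let ends := brks.map Prod.fst ++ [(v0 :: rest).getLast (by simp)]    -- … + [vals[-1]]
    starts.zip ends

-- ===== PRECONDITION & SPEC =====
def Spec_find_contiguous_sub_ranges (vals : List Int) (step : Int) (out : List (Int × Int)) : Prop := out = find_contiguous_sub_ranges_alt vals step
instance (vals : List Int) (step : Int) (out : List (Int × Int)) : Decidable (Spec_find_contiguous_sub_ranges vals step out) := by unfold Spec_find_contiguous_sub_ranges; infer_instance

-- ===== CLAIM (what is proved, stated in full; the proofs are below) =====
def Claim_equal_find_contiguous_sub_ranges : Prop := ∀ (vals : List Int) (step : Int), Dom_find_contiguous_sub_ranges vals step → Spec_find_contiguous_sub_ranges vals step (find_contiguous_sub_ranges vals step)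

-- ===== LEMMAS AND PROOFS =====

-- Common characterisation: given the element `prev` preceding the remaining list,
-- return (end of the current segment, the segments after it).
def pvSeg (step : Int) : List Int → Int → Int × List (Int × Int)
  | [], prev => (prev, [])
  | v :: rest, prev =>
    if v = prev + step then pvSeg step rest v
    else (prev, (v, (pvSeg step rest v).1) :: (pvSeg step rest v).2)

theorem pvLoopA_eq (step : Int) : ∀ (rest : List Int) (ranges : List (Int × Int)) (start prev : Int),
    pvLoopA step rest ranges start prev =
      ranges ++ (start, (pvSeg step rest prev).1) :: (pvSeg step rest prev).2 := by
  intro rest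
  induction rest with
  | nil => intro ranges start prev; simp [pvLoopA, pvSeg]
  | cons v rest ih =>
    intro ranges start prev
    by_cases h : v = prev + step
    · simp [pvLoopA, pvSeg, h, ih]
    · simp [pvLoopA, pvSeg, h, ih]

theorem pvAlt_eq (step : Int) : ∀ (rest : List Int) (v0 : Int),
    find_contiguous_sub_ranges_alt (v0 :: rest) step =
      (v0, (pvSeg step rest v0).1) :: (pvSeg step rest v0).2 := by
  intro rest
  induction rest with
  | nil => intro v0; simp [find_contiguous_sub_ranges_alt, pvSeg]
  | cons v1 rest ih =>
    intro v0
    by_cases h : v1 = v0 + step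
    · subst h
      have hib := ih (v0 + step)
      simp only [find_contiguous_sub_ranges_alt] at hib ⊢
      rw [List.getLast_cons (by simp)]
      simp only [List.zip_cons_cons, List.filter_cons]
      rw [if_neg (by simp)]
      simp only [pvSeg]
      simp only [if_true]
      -- both sides zip against the same nonempty `ends`; replace its head
      cases hY : (List.map Prod.fst ((((v0 + step) :: rest).zip rest).filter
          (fun p => decide (p.2 ≠ p.1 + step))) ++ [((v0 + step) :: rest).getLast (by simp)]) with
      | nil => simp at hY
      | cons y Y' =>
        rw [hY] at hib
        simp only [List.zip_cons_cons] at hib ⊢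
        have h1 : y = (pvSeg step rest (v0 + step)).1 := by
          have := congrArg (fun l => l.headD (0, 0)) hib; simpa using this
        have h2 : ((((((v0 + step) :: rest).zip rest).filter
            (fun p => decide (p.2 ≠ p.1 + step)))).map Prod.snd).zip Y' =
            (pvSeg step rest (v0 + step)).2 := by
          have := congrArg List.tail hib; simpa using this
        rw [h1, h2]
    · have hib := ih v1
      simp only [find_contiguous_sub_ranges_alt] at hib ⊢
      rw [List.getLast_cons (by simp)]
      simp only [List.zip_cons_cons, List.filter_cons]
      rw [if_pos (by simp [h])]
      simp only [pvSeg]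
      rw [if_neg h]
      simp only [List.map_cons, List.cons_append, List.zip_cons_cons]
      rw [hib]

-- ===== VERDICT (by name: the statement is the Claim_ definition above) =====
theorem find_contiguous_sub_ranges_spec : Claim_equal_find_contiguous_sub_ranges := by
  intro vals step _
  unfold Spec_find_contiguous_sub_ranges
  cases vals with
  | nil => rfl
  | cons v0 rest =>
    rw [pvAlt_eq]
    simp [find_contiguous_sub_ranges, pvLoopA_eq]
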